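-- pv_equiv track=rewrite | github.com/oneonlee/Identification-of-Causal-Factors-in-Aviation-Safety-Reports | ai_function.py | tag_to_sequence
-- ===== SOURCE A (Python) =====
-- def tag_to_sequence(result_list):
--     pred_list = []
--     for i in range(len(result_list)):
--         continue_flag = False
--         keyphrase_list = []
--         for token, tag in result_list[i]:
--             if continue_flag == True and tag == "O":
--                 keyphrase = " ".join(sequence)
--                 keyphrase_list.append(keyphrase)
--                 sequence = []
--                 continue_flag = False
--             elif continue_flag == True and tag != "O":
--                 sequence.append(token)
--                 continue_flag = True
--             elif continue_flag == False and tag == "O":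
--                 continue
--             elif continue_flag == False and tag != "O":
--                 sequence = []
--                 sequence.append(token)
--                 continue_flag = True
--         pred_list.append(keyphrase_list)
--     return pred_list
-- ===== SOURCE B (Python) =====
-- def group_runs(sent):
--     """Split sent into maximal runs of tokens with the same 'is O' status."""
--     groups = []
--     for token, tag in sent:
--         is_o = (tag == "O")
--         if groups and groups[-1][0] == is_o:
--             groups[-1][1].append(token)
--         else:
--             groups.append((is_o, [token]))
--     return groups
--
--
-- def sentence_phrases(sent):
--     groups = group_runs(sent)
--     # a keyphrase run ending the sentence is never flushed: drop it
--     if groups and not groups[-1][0]: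
--         groups.pop()
--     return [" ".join(toks) for is_o, toks in groups if not is_o]
--
--
-- def tag_to_sequence(result_list):
--     return [sentence_phrases(sent) for sent in result_list]
-- ===== Notes on version B (the rewrite author's own statement) =====
-- stated objective: simpler
-- what changed: Replaces the continue_flag/sequence state machine with a group-then-filter pass: split each sentence into maximal O/non-O runs, drop a trailing non-O run (A never flushes it), and join the remaining non-O runs.
import Mathlib
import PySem

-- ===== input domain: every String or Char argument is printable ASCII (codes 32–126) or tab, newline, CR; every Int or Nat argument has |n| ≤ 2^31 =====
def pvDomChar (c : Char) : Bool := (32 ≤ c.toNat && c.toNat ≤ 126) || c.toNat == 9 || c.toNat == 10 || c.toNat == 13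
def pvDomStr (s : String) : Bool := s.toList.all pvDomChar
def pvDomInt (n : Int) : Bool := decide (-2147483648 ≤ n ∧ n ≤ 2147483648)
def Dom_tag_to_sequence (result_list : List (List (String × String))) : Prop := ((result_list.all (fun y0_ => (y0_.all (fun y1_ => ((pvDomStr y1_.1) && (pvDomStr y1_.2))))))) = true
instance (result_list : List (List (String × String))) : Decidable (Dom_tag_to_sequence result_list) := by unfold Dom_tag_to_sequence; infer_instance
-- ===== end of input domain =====

-- B replaces A's continue_flag/sequence state machine with a group-then-filter pass (simpler decomposition; same cost).

-- ===== PORT A =====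
-- state: (continue_flag, sequence, keyphrase_list); Python's unbound `sequence` is
-- modelled as [] — it is only read when continue_flag is true, and by then it was assigned.
def tagStepA (st : Bool × List String × List String) (p : String × String) :
    Bool × List String × List String :=
  let (flag, seq, ks) := st
  if flag == true && p.2 == "O" then
    (false, [], ks ++ [PySem.Str.join " " seq])
  else if flag == true && !(p.2 == "O") then
    (true, seq ++ [p.1], ks)
  else if flag == false && p.2 == "O" then
    (flag, seq, ks)
  else
    (true, [p.1], ks)

def tag_to_sequence (result_list : List (List (String × String))) : List (List String) :=
  result_list.map (fun sent => (sent.foldl tagStepA (false, [], [])).2.2)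

-- ===== PORT B =====
def groupStep (gs : List (Bool × List String)) (p : String × String) :
    List (Bool × List String) :=
  let isO := p.2 == "O"
  match gs.getLast? with
  | some (b, toks) =>
      if b == isO then gs.dropLast ++ [(b, toks ++ [p.1])] else gs ++ [(isO, [p.1])]
  | none => [(isO, [p.1])]

def groupRuns (sent : List (String × String)) : List (Bool × List String) :=
  sent.foldl groupStep []

def sentencePhrases (sent : List (String × String)) : List String :=
  let gs := groupRuns sent
  let gs2 := match gs.getLast? with
    | some (b, _) => if b == false then gs.dropLast else gs
    | none => gs
  (gs2.filter (fun g => g.1 == false)).map (fun g => PySem.Str.join " " g.2)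

def tag_to_sequence_alt (result_list : List (List (String × String))) : List (List String) :=
  result_list.map sentencePhrases

-- ===== PRECONDITION & SPEC =====
def Spec_tag_to_sequence (result_list : List (List (String × String))) (out : List (List String)) : Prop := out = tag_to_sequence_alt result_list
instance (result_list : List (List (String × String))) (out : List (List String)) : Decidable (Spec_tag_to_sequence result_list out) := by unfold Spec_tag_to_sequence; infer_instance

-- ===== CLAIM (what is proved, stated in full; the proofs are below) =====
def Claim_equal_tag_to_sequence : Prop := ∀ (result_list : List (List (String × String))), Dom_tag_to_sequence result_list → Spec_tag_to_sequence result_list (tag_to_sequence result_list)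

-- ===== LEMMAS AND PROOFS =====

-- the components of A's loop state, read off the groups B has built so far
def flagOf (gs : List (Bool × List String)) : Bool :=
  match gs.getLast? with
  | some (b, _) => !b
  | none => false

def seqOf (gs : List (Bool × List String)) : List String :=
  match gs.getLast? with
  | some (b, toks) => if b then [] else toks
  | none => []

def ksOf (gs : List (Bool × List String)) : List String :=
  let gs2 := match gs.getLast? with
    | some (b, _) => if b == false then gs.dropLast else gs
    | none => gs
  (gs2.filter (fun g => g.1 == false)).map (fun g => PySem.Str.join " " g.2)

lemma step_inv (gs : List (Bool × List String)) (p : String × String) :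
    tagStepA (flagOf gs, seqOf gs, ksOf gs) p =
      (flagOf (groupStep gs p), seqOf (groupStep gs p), ksOf (groupStep gs p)) := by
  rcases p with ⟨tok, tag⟩
  rcases hl : gs.getLast? with _ | ⟨b, toks⟩
  · have hgs : gs = [] := List.getLast?_eq_none_iff.mp hl
    subst hgs
    by_cases hO : tag == "O" <;>
      simp [tagStepA, groupStep, flagOf, seqOf, ksOf, hO]
  · have hgs : gs.dropLast ++ [(b, toks)] = gs :=
      List.dropLast_append_getLast? _ (by simp [hl])
    by_cases hO : tag == "O" <;> cases b <;>
      simp [tagStepA, groupStep, flagOf, seqOf, ksOf, hl, hO,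
        List.filter_append, List.dropLast_concat, List.getLast?_concat] <;>
      rw [← hgs] <;>
      simp [List.filter_append, List.dropLast_concat, List.getLast?_concat]

lemma foldl_inv (xs : List (String × String)) (gs : List (Bool × List String)) :
    xs.foldl tagStepA (flagOf gs, seqOf gs, ksOf gs) =
      (flagOf (xs.foldl groupStep gs), seqOf (xs.foldl groupStep gs),
       ksOf (xs.foldl groupStep gs)) := by
  induction xs generalizing gs with
  | nil => rfl
  | cons p xs ih => simp only [List.foldl_cons, step_inv, ih]

lemma sentence_eq (sent : List (String × String)) :
    (sent.foldl tagStepA (false, [], [])).2.2 = sentencePhrases sent := by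
  have h0 : ((false : Bool), ([] : List String), ([] : List String)) =
      (flagOf [], seqOf [], ksOf []) := rfl
  rw [h0, foldl_inv]
  rfl

-- ===== VERDICT (by name: the statement is the Claim_ definition above) =====
theorem tag_to_sequence_spec : Claim_equal_tag_to_sequence := by
  intro result_list _
  unfold Spec_tag_to_sequence tag_to_sequence tag_to_sequence_alt
  exact List.map_congr_left (fun sent _ => sentence_eq sent)
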